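-- pv_equiv track=rewrite | github.com/Mao-o/cc-mp-worktools | plugins/sensitive-files-guard/hooks/redact-sensitive-reads/handlers/bash/operand_lexer.py | _literalize
-- ===== SOURCE A (Python) =====
-- def _literalize(pattern: str) -> str:
--     """fnmatch glob 文字 (``*`` ``?`` ``[...]``) を除去した最小 literal 表現。
--
--     例: ``.env*`` → ``.env``, ``*.env.*`` → ``.env.``, ``[.]env`` → ``env``,
--     ``?ecret*`` → ``ecret``, ``id_rsa*`` → ``id_rsa``。
--     """
--     out: list[str] = []
--     i = 0
--     n = len(pattern)
--     while i < n:
--         c = pattern[i]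
--         if c in ("*", "?"):
--             i += 1
--             continue
--         if c == "[":
--             j = pattern.find("]", i + 1)
--             if j == -1:
--                 out.append(c)
--                 i += 1
--             else:
--                 i = j + 1
--             continue
--         out.append(c)
--         i += 1
--     return "".join(out)
-- ===== SOURCE B (Python) =====
-- import re
--
-- _GLOB_META = re.compile(r'\[[^\]]*\]|[*?]')
--
--
-- def _literalize(pattern: str) -> str:
--     """fnmatch glob 文字 (``*`` ``?`` ``[...]``) を除去した最小 literal 表現。"""
--     return _GLOB_META.sub('', pattern)
-- ===== Notes on version B (the rewrite author's own statement) =====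
-- stated objective: idiomatic
-- what changed: Replaces the manual index-driven while-loop lexer (explicit cursor, substring find and output list) with a single precompiled regex substitution that deletes bracket classes and lone wildcards in one pass.
import Mathlib
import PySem

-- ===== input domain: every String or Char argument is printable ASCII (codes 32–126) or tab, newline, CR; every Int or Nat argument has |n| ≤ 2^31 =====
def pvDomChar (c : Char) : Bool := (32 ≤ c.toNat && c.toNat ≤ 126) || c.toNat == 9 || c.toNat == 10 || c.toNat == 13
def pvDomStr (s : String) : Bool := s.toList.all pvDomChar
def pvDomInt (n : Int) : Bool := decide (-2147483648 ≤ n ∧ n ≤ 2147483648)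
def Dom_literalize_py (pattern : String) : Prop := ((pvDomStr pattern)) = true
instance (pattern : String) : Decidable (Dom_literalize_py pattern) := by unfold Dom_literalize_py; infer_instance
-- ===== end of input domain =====

-- B replaces A's manual index-driven while loop with a single regex substitution
-- re.sub(r'\[[^\]]*\]|[*?]', '', pattern) (objective: more idiomatic; same O(n) cost).

-- ===== PORT A =====
-- A's while loop: cursor i, output list `out`, pattern.find(']', i+1) = Chars.findFrom.
def pvALoop (cs : List Char) (out : List Char) (i : Nat) : List Char :=
  if h : i < cs.length then
    let c := cs[i]
    if c = '*' ∨ c = '?' then pvALoop cs out (i+1)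
    else if c = '[' then
      let j := PySem.Chars.findFrom cs [']'] ((i+1 : Nat) : Int) none
      if j = -1 then pvALoop cs (out ++ [c]) (i+1)
      else pvALoop cs out (j.toNat + 1)
    else pvALoop cs (out ++ [c]) (i+1)
  else out
termination_by cs.length - i
decreasing_by
  · omega
  · omega
  · have hk : i + 1 ≤ cs.length := h
    have hs := PySem.Chars.findFrom_natCast_spec cs [']'] (i+1) hk (by simpa using ‹_›)
    omega
  · omega

def literalize_py (pattern : String) : String :=
  String.ofList (pvALoop pattern.toList [] 0)

-- ===== PORT B =====
-- Source B's regex sub, transcribed step for step: at each position the engine first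
-- tries the alternation branch '\[[^\]]*\]' ('[', then a run of non-']' = takeWhile,
-- then a ']'), else the branch '[*?]', else the character is kept; a match is deleted
-- and scanning resumes after it. Exact for this regex (no backtracking across branches).
def pvBScan (cs : List Char) : List Char :=
  match cs with
  | [] => []
  | c :: rest =>
    if c = '[' then
      -- branch '\[[^\]]*\]': [^\]]* is the maximal run of non-']' characters
      match h : rest.dropWhile (· ≠ ']') with
      | _ :: tail => pvBScan tail          -- closing ']' found: whole class deleted
      | [] =>                              -- no ']': branch fails, try '[*?]' — '[' is neither, kept
        c :: pvBScan rest
    else if c = '*' ∨ c = '?' then pvBScan rest   -- branch '[*?]': deleted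
    else c :: pvBScan rest
termination_by cs.length
decreasing_by
  · have := List.length_dropWhile_le (p := (· ≠ ']')) (l := rest)
    rw [h] at this
    simp only [List.length_cons] at this ⊢
    omega
  · simp only [List.length_cons]; omega
  · simp only [List.length_cons]; omega
  · simp only [List.length_cons]; omega

def literalize_py_alt (pattern : String) : String :=
  String.ofList (pvBScan pattern.toList)

-- ===== PRECONDITION & SPEC =====
def Spec_literalize_py (pattern : String) (out : String) : Prop := out = literalize_py_alt pattern
instance (pattern : String) (out : String) : Decidable (Spec_literalize_py pattern out) := by unfold Spec_literalize_py; infer_instance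

-- ===== CLAIM (what is proved, stated in full; the proofs are below) =====
def Claim_equal_literalize_py : Prop := ∀ (pattern : String), Dom_literalize_py pattern → Spec_literalize_py pattern (literalize_py pattern)

-- ===== LEMMAS AND PROOFS =====


lemma pv_drop_takeWhile (p : Char → Bool) (l : List Char) :
    l.drop ((l.takeWhile p).length) = l.dropWhile p := by
  have h2 : (l.takeWhile p ++ l.dropWhile p).drop ((l.takeWhile p).length) = l.dropWhile p :=
    List.drop_left
  rwa [List.takeWhile_append_dropWhile] at h2

lemma pv_find_close (l : List Char) (hmem : ']' ∈ l) :
    PySem.Chars.find l [']'] = ((l.takeWhile (· ≠ ']')).length : Int) := by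
  set m := (l.takeWhile (· ≠ ']')).length with hm
  have hinf : [']'] <:+: l := by
    obtain ⟨s, t, rfl⟩ := List.append_of_mem hmem
    exact ⟨s, t, by simp⟩
  have h0 : 0 ≤ PySem.Chars.find l [']'] := (PySem.Chars.find_nonneg_iff l [']']).mpr hinf
  obtain ⟨hpre, hmin⟩ := PySem.Chars.find_spec (s := l) (sub := [']']) h0
  -- the dropWhile suffix is nonempty and starts with ']'
  have hdw : l.dropWhile (· ≠ ']') ≠ [] := by
    intro hnil
    have := (List.dropWhile_eq_nil_iff).mp hnil _ hmem
    simp at this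
  obtain ⟨hd, tl, hcons⟩ : ∃ hd tl, l.dropWhile (· ≠ ']') = hd :: tl := by
    cases h : l.dropWhile (· ≠ ']') with
    | nil => exact absurd h hdw
    | cons a b => exact ⟨a, b, rfl⟩
  have hhd : hd = ']' := by
    have h1 := List.head_dropWhile_not (· ≠ ']') hdw
    have h2 : (l.dropWhile (· ≠ ']')).head? = some ((l.dropWhile (· ≠ ']')).head hdw) :=
      List.head?_eq_some_head hdw
    have h3 : (l.dropWhile (· ≠ ']')).head? = some hd := by rw [hcons]; rfl
    rw [h3] at h2
    have h4 := Option.some.inj h2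
    rw [← h4] at h1
    simpa using h1
  have ha : [']'] <+: l.drop m := by
    rw [hm, pv_drop_takeWhile, hcons, hhd]
    exact ⟨_, rfl⟩
  have hb : ∀ i, i < m → ¬ ([']'] <+: l.drop i) := by
    intro i hi hpref
    have hh : (l.drop i).head? = some ']' := by
      obtain ⟨t, ht⟩ := hpref
      rw [← ht]; rfl
    rw [List.head?_drop] at hh
    have hiT : i < (l.takeWhile (· ≠ ']')).length := hi
    have : l[i]? = (l.takeWhile (· ≠ ']'))[i]? := by
      conv_lhs => rw [← List.takeWhile_append_dropWhile (p := (· ≠ ']')) (l := l)]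
      rw [List.getElem?_append_left hiT]
    rw [this] at hh
    have hmemT : ']' ∈ l.takeWhile (· ≠ ']') := by
      exact List.mem_of_getElem? hh
    have := List.mem_takeWhile_imp hmemT
    simp at this
  -- conclude
  set f := (PySem.Chars.find l [']']).toNat with hf
  have hfeq : PySem.Chars.find l [']'] = (f : Int) := (Int.toNat_of_nonneg h0).symm
  have : f = m := by
    rcases Nat.lt_trichotomy f m with h | h | h
    · exact absurd hpre (hb f h)
    · exact h
    · exact absurd ha (hmin m (by omega))
  rw [hfeq, this]

lemma pv_close_split (l : List Char) (hmem : ']' ∈ l) :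
    l.dropWhile (· ≠ ']') = ']' :: l.drop ((l.takeWhile (· ≠ ']')).length + 1) := by
  set m := (l.takeWhile (· ≠ ']')).length with hm
  have hdrop : l.drop m = l.dropWhile (· ≠ ']') := pv_drop_takeWhile _ l
  have hdw : l.dropWhile (· ≠ ']') ≠ [] := by
    intro hnil
    have := (List.dropWhile_eq_nil_iff).mp hnil _ hmem
    simp at this
  obtain ⟨hd, tl, hcons⟩ : ∃ hd tl, l.dropWhile (· ≠ ']') = hd :: tl := by
    cases h : l.dropWhile (· ≠ ']') with
    | nil => exact absurd h hdw
    | cons a b => exact ⟨a, b, rfl⟩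
  have hhd : hd = ']' := by
    have h1 := List.head_dropWhile_not (· ≠ ']') hdw
    have h2 : (l.dropWhile (· ≠ ']')).head? = some ((l.dropWhile (· ≠ ']')).head hdw) :=
      List.head?_eq_some_head hdw
    have h3 : (l.dropWhile (· ≠ ']')).head? = some hd := by rw [hcons]; rfl
    rw [h3] at h2
    have h4 := Option.some.inj h2
    rw [← h4] at h1
    simpa using h1
  have htl : tl = l.drop (m + 1) := by
    have : l.drop (m + 1) = (l.drop m).drop 1 := by rw [List.drop_drop]
    rw [this, hdrop, hcons]
    rfl
  rw [hcons, hhd, htl]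

lemma pv_aLoop_eq : ∀ (k : Nat) (cs : List Char) (i : Nat) (out : List Char),
    cs.length - i ≤ k → pvALoop cs out i = out ++ pvBScan (cs.drop i) := by
  intro k
  induction k with
  | zero =>
      intro cs i out hk
      have hge : cs.length ≤ i := by omega
      have hnil : cs.drop i = [] := List.drop_eq_nil_of_le hge
      rw [pvALoop, hnil]
      simp [Nat.not_lt.mpr hge, pvBScan]
  | succ k ih =>
      intro cs i out hk
      by_cases h : i < cs.length
      · rw [pvALoop]
        simp only [dif_pos h]
        rw [List.drop_eq_getElem_cons h]
        by_cases hst : cs[i] = '*' ∨ cs[i] = '?'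
        · have hne : ¬ cs[i] = '[' := by rcases hst with h' | h' <;> simp [h']
          rw [if_pos hst, ih cs (i+1) out (by omega)]
          conv_rhs => rw [pvBScan]
          rw [if_neg hne, if_pos hst]
        · by_cases hbr : cs[i] = '['
          · rw [if_neg hst, if_pos hbr]
            have hk1 : i + 1 ≤ cs.length := h
            rw [PySem.Chars.findFrom_natCast cs [']'] (i+1) hk1]
            by_cases hfind : PySem.Chars.find (cs.drop (i+1)) [']'] = -1
            · -- no closing bracket: '[' is kept, scan continues at i+1
              rw [if_pos hfind]
              simp only [reduceIte]
              rw [ih cs (i+1) (out ++ [cs[i]]) (by omega)]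
              have hnot : ']' ∉ cs.drop (i+1) := by
                intro hmem
                have : [']'] <:+: cs.drop (i+1) := by
                  obtain ⟨s, t, hst'⟩ := List.append_of_mem hmem
                  exact ⟨s, t, by rw [hst']; simp⟩
                exact (PySem.Chars.find_eq_neg_one_iff _ _).mp hfind this
              have hdw : (cs.drop (i+1)).dropWhile (· ≠ ']') = [] := by
                rw [List.dropWhile_eq_nil_iff]
                intro a ha
                simp
                intro hctr
                exact hnot (hctr ▸ ha)
              conv_rhs => rw [pvBScan]
              rw [if_pos hbr]
              split
              · rename_i heq
                rw [hdw] at heq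
                exact absurd heq (by simp)
              · rw [List.append_assoc]
                rfl
            · -- closing bracket found at i+1+m: skip past it
              have hmem : ']' ∈ cs.drop (i+1) := by
                have hinf : [']'] <:+: cs.drop (i+1) := by
                  by_contra hc
                  exact hfind ((PySem.Chars.find_eq_neg_one_iff _ _).mpr hc)
                obtain ⟨s, t, hst'⟩ := hinf
                rw [← hst']
                simp
              set m := ((cs.drop (i+1)).takeWhile (· ≠ ']')).length with hm
              have hfeq : PySem.Chars.find (cs.drop (i+1)) [']'] = (m : Int) :=
                pv_find_close _ hmem
              have htn : ((((i+1 : Nat) : Int)) + PySem.Chars.find (cs.drop (i+1)) [']']).toNat = i + 1 + m := by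
                rw [hfeq]
                omega
              rw [if_neg hfind]
              rw [if_neg (show ¬((((i+1 : Nat) : Int)) + PySem.Chars.find (cs.drop (i+1)) [']'] = -1) by
                rw [hfeq]; omega)]
              rw [htn, ih cs (i + 1 + m + 1) out (by omega)]
              conv_rhs => rw [pvBScan]
              rw [if_pos hbr]
              have hsplit := pv_close_split (cs.drop (i+1)) hmem
              have hdd : (cs.drop (i+1)).drop (m + 1) = cs.drop (i + 1 + m + 1) := by
                rw [List.drop_drop]
                congr 1
              rw [hdd] at hsplit
              split
              · rename_i hd' tl' heq
                rw [hsplit] at heq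
                have : tl' = cs.drop (i + 1 + m + 1) := (List.cons.inj heq).2.symm
                rw [this]
              · rename_i heq
                rw [hsplit] at heq
                exact absurd heq (by simp)
          · rw [if_neg hst, if_neg hbr, ih cs (i+1) (out ++ [cs[i]]) (by omega)]
            conv_rhs => rw [pvBScan]
            rw [if_neg hbr, if_neg hst]
            rw [List.append_assoc]
            rfl
      · have hge : cs.length ≤ i := by omega
        have hnil : cs.drop i = [] := List.drop_eq_nil_of_le hge
        rw [pvALoop, hnil]
        simp [Nat.not_lt.mpr hge, pvBScan]

-- ===== VERDICT (by name: the statement is the Claim_ definition above) =====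
theorem literalize_py_spec : Claim_equal_literalize_py := by
  intro pattern _
  unfold Spec_literalize_py literalize_py literalize_py_alt
  rw [pv_aLoop_eq (pattern.toList.length) pattern.toList 0 [] (by omega)]
  simp
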